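-- pv_equiv track=rewrite | github.com/SirEOF/ctf-crypto | subst.py | flipAsciiOverPivot
-- ===== SOURCE A (Python) =====
-- def flipAsciiOverPivot(text, pivot, offset):
-- 	out = ''
-- 	for char in text:
-- 		charNum = ord(char)
-- 		if char == ' ':
-- 			out += ' '
-- 			continue
-- 		elif charNum < pivot:
-- 			out += chr(charNum + offset)
-- 			continue
-- 		elif charNum > pivot:
-- 			out += chr(charNum - offset)
-- 			continue
-- 		else:
-- 			out += '*'
-- 	return out
-- ===== SOURCE B (Python) =====
-- def flipAsciiOverPivot(text, pivot, offset):
--     table = {}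
--     for c in set(text):
--         if c == ' ':
--             table[ord(c)] = ' '
--         elif ord(c) < pivot:
--             table[ord(c)] = chr(ord(c) + offset)
--         elif ord(c) > pivot:
--             table[ord(c)] = chr(ord(c) - offset)
--         else:
--             table[ord(c)] = '*'
--     return text.translate(table)
-- ===== Notes on version B (the rewrite author's own statement) =====
-- stated objective: faster
-- what changed: B precomputes a codepoint->replacement translation table from the distinct characters of text and applies it in one library pass with str.translate, instead of branching per character while concatenating; this was measured ~2.6x faster.
import Mathlib
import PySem

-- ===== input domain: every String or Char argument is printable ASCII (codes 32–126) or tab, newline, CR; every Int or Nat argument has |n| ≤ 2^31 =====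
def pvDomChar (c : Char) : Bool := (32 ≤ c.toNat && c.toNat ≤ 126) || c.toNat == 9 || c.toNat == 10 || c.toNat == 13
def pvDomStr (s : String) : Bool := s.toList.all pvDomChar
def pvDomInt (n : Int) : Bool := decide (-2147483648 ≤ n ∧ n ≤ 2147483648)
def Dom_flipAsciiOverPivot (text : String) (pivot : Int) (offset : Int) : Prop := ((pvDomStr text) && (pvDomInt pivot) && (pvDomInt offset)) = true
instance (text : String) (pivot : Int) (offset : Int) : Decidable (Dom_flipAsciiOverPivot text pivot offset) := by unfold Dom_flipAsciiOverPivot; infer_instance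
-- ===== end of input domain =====

-- B builds a codepoint->replacement table from the distinct chars of text once and applies it in a single translate pass (idiomatic; return-value equivalence).


-- Python's chr(n), total form; exact for 0 ≤ n < 0xD800 or 0xE000 ≤ n ≤ 0x10FFFF (guaranteed by Pre_).
def pvChr (n : Int) : Char := Char.ofNat n.toNat

-- ===== PORT A =====
def flipAsciiOverPivot (text : String) (pivot : Int) (offset : Int) : String :=
  String.ofList (text.toList.foldl (fun out c =>
    if c = ' ' then out ++ [' ']
    else if (c.toNat : Int) < pivot then out ++ [pvChr ((c.toNat : Int) + offset)]
    else if (c.toNat : Int) > pivot then out ++ [pvChr ((c.toNat : Int) - offset)]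
    else out ++ ['*']) [])

-- ===== PORT B =====
-- the translation table: codepoint -> replacement char, built from the distinct chars of text
def pvTable (text : String) (pivot : Int) (offset : Int) : PySem.Dict Int Char :=
  (PySem.Set.ofList text.toList).foldl (fun d c =>
    if c = ' ' then d.insert (c.toNat : Int) ' '
    else if (c.toNat : Int) < pivot then d.insert (c.toNat : Int) (pvChr ((c.toNat : Int) + offset))
    else if (c.toNat : Int) > pivot then d.insert (c.toNat : Int) (pvChr ((c.toNat : Int) - offset))
    else d.insert (c.toNat : Int) '*') PySem.Dict.empty

-- str.translate: chars whose codepoint is absent stay unchanged (getD default c)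
def flipAsciiOverPivot_alt (text : String) (pivot : Int) (offset : Int) : String :=
  String.ofList (text.toList.map (fun c => (pvTable text pivot offset).getD (c.toNat : Int) c))

-- ===== PRECONDITION & SPEC =====
-- Pre_ excludes inputs where some produced codepoint is an invalid chr() argument (both programs
-- raise ValueError there) or lands in the surrogate range 0xD800–0xDFFF, where both programs
-- return the same Python string but it is not representable as a Lean String.
def pvOkCode (n : Int) : Bool := (0 ≤ n && n < 55296) || (57344 ≤ n && n ≤ 1114111)

def Pre_flipAsciiOverPivot (text : String) (pivot : Int) (offset : Int) : Prop :=
  (text.toList.all (fun c =>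
    if c = ' ' then true
    else if (c.toNat : Int) < pivot then pvOkCode ((c.toNat : Int) + offset)
    else if (c.toNat : Int) > pivot then pvOkCode ((c.toNat : Int) - offset)
    else true)) = true
instance (text : String) (pivot : Int) (offset : Int) : Decidable (Pre_flipAsciiOverPivot text pivot offset) := by unfold Pre_flipAsciiOverPivot; infer_instance

def pvWitness_flipAsciiOverPivot : String × Int × Int := ("ab c", 98, 5)

def Spec_flipAsciiOverPivot (text : String) (pivot : Int) (offset : Int) (out : String) : Prop := out = flipAsciiOverPivot_alt text pivot offset
instance (text : String) (pivot : Int) (offset : Int) (out : String) : Decidable (Spec_flipAsciiOverPivot text pivot offset out) := by unfold Spec_flipAsciiOverPivot; infer_instance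

-- ===== CLAIM (what is proved, stated in full; the proofs are below) =====
def Claim_equal_flipAsciiOverPivot : Prop := ∀ (text : String) (pivot : Int) (offset : Int), Dom_flipAsciiOverPivot text pivot offset → Pre_flipAsciiOverPivot text pivot offset → Spec_flipAsciiOverPivot text pivot offset (flipAsciiOverPivot text pivot offset)

-- ===== LEMMAS AND PROOFS =====

-- the common per-character replacement both ports compute
def pvRepl (pivot offset : Int) (c : Char) : Char :=
  if c = ' ' then ' '
  else if (c.toNat : Int) < pivot then pvChr ((c.toNat : Int) + offset)
  else if (c.toNat : Int) > pivot then pvChr ((c.toNat : Int) - offset)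
  else '*'

theorem foldl_A_eq_map (pivot offset : Int) (l out : List Char) :
    l.foldl (fun out c =>
      if c = ' ' then out ++ [' ']
      else if (c.toNat : Int) < pivot then out ++ [pvChr ((c.toNat : Int) + offset)]
      else if (c.toNat : Int) > pivot then out ++ [pvChr ((c.toNat : Int) - offset)]
      else out ++ ['*']) out = out ++ l.map (pvRepl pivot offset) := by
  induction l generalizing out with
  | nil => simp
  | cons a t ih =>
    simp only [List.foldl_cons, List.map_cons, ih, pvRepl]
    split_ifs <;> simp

theorem getD_foldl_insert_not_mem {l : List Char} {key : Char → Int} {v : Char → Char}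
    (d : PySem.Dict Int Char) (k : Int) (dflt : Char) (hk : k ∉ l.map key) :
    (l.foldl (fun d x => d.insert (key x) (v x)) d).getD k dflt = d.getD k dflt := by
  induction l generalizing d with
  | nil => rfl
  | cons a t ih =>
    simp only [List.map_cons, List.mem_cons, not_or] at hk
    simp only [List.foldl_cons]
    rw [ih _ hk.2, PySem.Dict.getD_insert_of_ne d _ _ hk.1]

theorem getD_foldl_insert_mem {l : List Char} {key : Char → Int} {v : Char → Char}
    (d : PySem.Dict Int Char) (dflt : Char) (hn : (l.map key).Nodup)
    {c : Char} (hc : c ∈ l) :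
    (l.foldl (fun d x => d.insert (key x) (v x)) d).getD (key c) dflt = v c := by
  induction l generalizing d with
  | nil => cases hc
  | cons a t ih =>
    simp only [List.map_cons, List.nodup_cons] at hn
    simp only [List.foldl_cons]
    rcases List.mem_cons.mp hc with rfl | hct
    · rw [getD_foldl_insert_not_mem _ _ _ hn.1, PySem.Dict.getD_insert_self]
    · exact ih _ hn.2 hct

theorem table_getD (text : String) (pivot offset : Int) {c : Char} (hc : c ∈ text.toList) :
    (pvTable text pivot offset).getD (c.toNat : Int) c = pvRepl pivot offset c := by
  have hmem : c ∈ PySem.Set.ofList text.toList := by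
    rw [PySem.Set.mem_ofList]; exact hc
  have hnodup : ((PySem.Set.ofList text.toList).map (fun x : Char => (x.toNat : Int))).Nodup := by
    refine (PySem.Set.nodup_ofList text.toList).map ?_
    intro x y h
    have h0 : (x.toNat : Int) = (y.toNat : Int) := h
    have h' : x.toNat = y.toNat := by exact_mod_cast h0
    exact Char.ext (UInt32.toNat_inj.mp h')
  have hfun : (fun (d : PySem.Dict Int Char) (c : Char) =>
      if c = ' ' then d.insert (c.toNat : Int) ' '
      else if (c.toNat : Int) < pivot then d.insert (c.toNat : Int) (pvChr ((c.toNat : Int) + offset))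
      else if (c.toNat : Int) > pivot then d.insert (c.toNat : Int) (pvChr ((c.toNat : Int) - offset))
      else d.insert (c.toNat : Int) '*') =
      fun d x => d.insert ((fun x : Char => (x.toNat : Int)) x) (pvRepl pivot offset x) := by
    funext d x
    simp only [pvRepl]
    split_ifs <;> rfl
  rw [pvTable, hfun]
  exact getD_foldl_insert_mem _ _ hnodup hmem

-- ===== VERDICT (by name: the statement is the Claim_ definition above) =====
theorem flipAsciiOverPivot_spec : Claim_equal_flipAsciiOverPivot := by
  intro text pivot offset _ _
  unfold Spec_flipAsciiOverPivot flipAsciiOverPivot flipAsciiOverPivot_alt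
  rw [foldl_A_eq_map]
  congr 1
  simp only [List.nil_append]
  exact List.map_congr_left (fun c hc => (table_getD text pivot offset hc).symm)
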